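-- pv_equiv track=rewrite | github.com/marcusgj13/tert_TRAP_TEN | SCRIPTS/extractOrderedTen.py | find_ordered_region
-- ===== SOURCE A (Python) =====
-- def find_ordered_region(seq, disorder_values):
--     """This function is used to determine the beginning and end of an ordered region
--     within the TEN domain of TERT. It uses disopred to first predict disordered regions
--     and then looks for *'s at the beginning and end to find the end of N-terminal and
--     C-terminal disordered regions."""
--     ind = 0
--     consecutive_disorder = 0
--     for x in disorder_values:
--         if x == '*':
--             consecutive_disorder += 1
--         else:
--             consecutive_disorder = 0
--         ind += 1
--         if consecutive_disorder == 10 and ind > 30: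
--             break
--
--     partial_seq = ''.join(seq[:ind-9])
--     return partial_seq
-- ===== SOURCE B (Python) =====
-- def find_ordered_region(seq, disorder_values):
--     """Run-based re-implementation: collect maximal runs of consecutive '*',
--     pick the first run of length >= 10 starting at index >= 21 (A's '10th star
--     past position 30' test), and slice the sequence accordingly."""
--     runs = []
--     start = None
--     for i, x in enumerate(disorder_values):
--         if x == '*':
--             if start is None:
--                 start = i
--         elif start is not None:
--             runs.append((start, i - start))
--             start = None
--     if start is not None:
--         runs.append((start, len(disorder_values) - start))
--     for s, length in runs:
--         if length >= 10 and s >= 21: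
--             return ''.join(seq[:s + 1])
--     return ''.join(seq[:len(disorder_values) - 9])
-- ===== Notes on version B (the rewrite author's own statement) =====
-- stated objective: alternative
-- what changed: B first groups disorder_values into maximal runs of '*' (start,length pairs), then selects the first run with length >= 10 and start >= 21, instead of A's fused stateful scan with a counter and a mid-loop break.
import Mathlib
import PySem

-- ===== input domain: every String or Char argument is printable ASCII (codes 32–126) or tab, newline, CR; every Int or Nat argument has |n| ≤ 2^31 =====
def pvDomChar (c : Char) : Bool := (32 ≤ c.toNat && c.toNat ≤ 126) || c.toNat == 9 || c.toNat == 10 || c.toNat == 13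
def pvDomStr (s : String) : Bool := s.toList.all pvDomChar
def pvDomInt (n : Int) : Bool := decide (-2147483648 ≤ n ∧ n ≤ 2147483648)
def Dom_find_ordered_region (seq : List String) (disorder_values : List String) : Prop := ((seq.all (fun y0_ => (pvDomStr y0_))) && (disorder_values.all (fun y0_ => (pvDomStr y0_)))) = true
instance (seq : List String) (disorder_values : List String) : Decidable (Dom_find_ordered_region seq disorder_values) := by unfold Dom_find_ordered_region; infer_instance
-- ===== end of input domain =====

-- B groups disorder_values into maximal runs of '*' and picks the first qualifying run,
-- instead of A's fused counter scan with a mid-loop break (objective: alternative decomposition).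

-- ===== PORT A =====
-- the for-loop of A: state (ind, consecutive_disorder); returns the value of ind after the loop
def findA_loop : List String → Int → Int → Int
  | [], ind, _ => ind
  | x :: xs, ind, consec =>
    let consec' := if x = "*" then consec + 1 else 0
    let ind' := ind + 1
    if consec' = 10 ∧ ind' > 30 then ind'
    else findA_loop xs ind' consec'

def find_ordered_region (seq : List String) (disorder_values : List String) : String :=
  let ind := findA_loop disorder_values 0 0
  let partial_seq := PySem.Str.join "" (PySem.List.slice seq none (some (ind - 9)))
  partial_seq

-- ===== PORT B =====
-- first pass of Source B: the list of maximal '*' runs as (start, length), given next index i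
-- and the start of the currently open run (None ↔ no open run)
def runsB : List String → Int → Option Int → List (Int × Int)
  | [], _, none => []
  | [], i, some s => [(s, i - s)]
  | x :: xs, i, st =>
    if x = "*" then
      runsB xs (i + 1) (match st with | none => some i | some s => some s)
    else
      match st with
      | none => runsB xs (i + 1) none
      | some s => (s, i - s) :: runsB xs (i + 1) none

-- second pass of Source B: first run with length ≥ 10 and start ≥ 21
def firstRunB : List (Int × Int) → Option Int
  | [] => none
  | (s, length) :: rest => if length ≥ 10 ∧ s ≥ 21 then some s else firstRunB rest

def find_ordered_region_alt (seq : List String) (disorder_values : List String) : String :=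
  match firstRunB (runsB disorder_values 0 none) with
  | some s => PySem.Str.join "" (PySem.List.slice seq none (some (s + 1)))
  | none => PySem.Str.join "" (PySem.List.slice seq none (some ((disorder_values.length : Int) - 9)))

-- ===== PRECONDITION & SPEC =====
def Spec_find_ordered_region (seq : List String) (disorder_values : List String) (out : String) : Prop := out = find_ordered_region_alt seq disorder_values
instance (seq : List String) (disorder_values : List String) (out : String) : Decidable (Spec_find_ordered_region seq disorder_values out) := by unfold Spec_find_ordered_region; infer_instance

-- ===== CLAIM (what is proved, stated in full; the proofs are below) =====
def Claim_equal_find_ordered_region : Prop := ∀ (seq : List String) (disorder_values : List String), Dom_find_ordered_region seq disorder_values → Spec_find_ordered_region seq disorder_values (find_ordered_region seq disorder_values)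

-- ===== LEMMAS AND PROOFS =====

-- fused version of B's two passes, used only in the proof
def bsearch : List String → Int → Option Int → Option Int
  | [], _, none => none
  | [], i, some s => if i - s ≥ 10 ∧ s ≥ 21 then some s else none
  | x :: xs, i, st =>
    if x = "*" then
      bsearch xs (i + 1) (match st with | none => some i | some s => some s)
    else
      match st with
      | none => bsearch xs (i + 1) none
      | some s => if i - s ≥ 10 ∧ s ≥ 21 then some s else bsearch xs (i + 1) none

theorem firstRunB_runsB (dv : List String) (i : Int) (st : Option Int) :
    firstRunB (runsB dv i st) = bsearch dv i st := by
  induction dv generalizing i st with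
  | nil => cases st <;> simp [runsB, firstRunB, bsearch]
  | cons x xs ih =>
    cases st with
    | none =>
      simp only [runsB, bsearch]
      split_ifs <;> exact ih _ _
    | some s =>
      simp only [runsB, bsearch]
      split_ifs with h h2
      · exact ih _ _
      · simp [firstRunB, h2]
      · simp [firstRunB, h2, ih]

-- an open run that already has length ≥ 10 and start ≥ 21 is the run bsearch returns
theorem bsearch_qualified (xs : List String) (j s : Int) (hlen : j - s ≥ 10) (hs : s ≥ 21) :
    bsearch xs j (some s) = some s := by
  induction xs generalizing j with
  | nil => simp [bsearch, hlen, hs]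
  | cons x xs ih =>
    simp only [bsearch]
    split_ifs with h hq
    · exact ih (j + 1) (by omega)
    · rfl
    · exact absurd ⟨hlen, hs⟩ hq

-- key invariant: A's loop result, expressed through the fused run search.
-- state encoding: consec = c ↔ an open run of length c starting at i - c (none if c = 0);
-- reachable states satisfy 10 ≤ c → i ≤ c + 20 (a run that hit 10 at position ≤ 30 can
-- never trigger the break again, and its start i - c ≤ 20 also fails the s ≥ 21 test).
theorem findA_loop_eq_bsearch (dv : List String) (i c : Int) (hc : 0 ≤ c)
    (hbound : 10 ≤ c → i ≤ c + 20) :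
    findA_loop dv i c =
      match bsearch dv i (if c = 0 then none else some (i - c)) with
      | some s => s + 10
      | none => i + dv.length := by
  induction dv generalizing i c with
  | nil =>
    by_cases h : c = 0
    · simp [findA_loop, bsearch, h]
    · have hq : ¬ (i - (i - c) ≥ 10 ∧ i - c ≥ 21) := by
        intro hand
        have := hbound (by omega)
        omega
      simp only [findA_loop, if_neg h, bsearch, if_neg hq, List.length_nil]
      push_cast
      ring
  | cons x xs ih =>
    by_cases hx : x = "*"
    · -- star case: both sides extend/open the run
      have hst : bsearch (x :: xs) i (if c = 0 then none else some (i - c)) =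
          bsearch xs (i + 1) (some (i - c)) := by
        by_cases h : c = 0
        · simp [bsearch, hx, h]
        · simp [bsearch, hx, h]
      rw [hst]
      simp only [findA_loop, hx, if_true]
      by_cases hbrk : c + 1 = 10 ∧ i + 1 > 30
      · obtain ⟨h10, h30⟩ := hbrk
        rw [if_pos ⟨h10, h30⟩]
        rw [bsearch_qualified xs (i + 1) (i - c) (by omega) (by omega)]
        show i + 1 = (i - c) + 10
        omega
      · rw [if_neg hbrk]
        have hb2 : 10 ≤ c + 1 → i + 1 ≤ (c + 1) + 20 := by
          intro h
          rcases eq_or_lt_of_le h with h10 | h10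
          · have hile : ¬ (i + 1 > 30) := fun hi => hbrk ⟨h10.symm, hi⟩
            omega
          · have := hbound (by omega)
            omega
        have hIH := ih (i + 1) (c + 1) (by omega) hb2
        rw [if_neg (by omega : ¬ (c + 1 = 0))] at hIH
        rw [show i + 1 - (c + 1) = i - c by ring] at hIH
        rw [hIH]
        cases bsearch xs (i + 1) (some (i - c)) with
        | none => simp; ring
        | some s => rfl
    · -- non-star: counter resets; a closing run with c ≥ 10 has start ≤ 20, so never qualifies
      have hst : bsearch (x :: xs) i (if c = 0 then none else some (i - c)) =
          bsearch xs (i + 1) none := by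
        by_cases h : c = 0
        · simp [bsearch, hx, h]
        · have hq : ¬ (i - (i - c) ≥ 10 ∧ i - c ≥ 21) := by
            intro hand
            have := hbound (by omega)
            omega
          simp only [bsearch, if_neg hx, h, if_false]
          rw [if_neg hq]
      rw [hst]
      have hA : ¬ ((if x = "*" then c + 1 else 0) = 10 ∧ i + 1 > 30) := by
        simp [hx]
      simp only [findA_loop, if_neg hA]
      simp only [hx, if_false]
      have hIH := ih (i + 1) 0 le_rfl (by omega)
      rw [if_pos rfl] at hIH
      rw [hIH]
      cases bsearch xs (i + 1) none with
      | none => simp; ring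
      | some s => rfl

-- ===== VERDICT (by name: the statement is the Claim_ definition above) =====
theorem find_ordered_region_spec : Claim_equal_find_ordered_region := by
  intro seq dv _
  show PySem.Str.join "" (PySem.List.slice seq none (some (findA_loop dv 0 0 - 9)))
      = find_ordered_region_alt seq dv
  unfold find_ordered_region_alt
  have h := findA_loop_eq_bsearch dv 0 0 le_rfl (by omega)
  rw [if_pos rfl] at h
  rw [← firstRunB_runsB dv 0 none] at h
  rw [h]
  cases firstRunB (runsB dv 0 none) with
  | none => simp
  | some s => simp only []; ring_nf
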